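-- pv_equiv track=rewrite | github.com/yuyeol3/bojsrc | 백준/Silver/2108. 통계학/통계학.py | modeof
-- ===== SOURCE A (Python) =====
-- def modeof(nums):
--     dict_nums = {}
--
--     for num in set(nums):
--         dict_nums[num] = 0
--
--     for num in nums:
--         dict_nums[num] += 1
--
--     max_freq = max(dict_nums.values())
--
--     res = []
--
--     for num in dict_nums:
--         if dict_nums[num] == max_freq:
--             res.append(num)
--
--     res.sort()
--
--     if len(res) <= 1:
--         return res[0]
--
--     else:
--         return res[1]
-- ===== SOURCE B (Python) =====
-- def modeof(nums):
--     # Sort a copy, run-length encode the sorted list, then pick the values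
--     # with maximal count (already ascending): first one, or second on a tie.
--     s = sorted(nums)
--     groups = []  # (value, run length) pairs in ascending value order
--     i = 0
--     while i < len(s):
--         j = i
--         while j < len(s) and s[j] == s[i]:
--             j += 1
--         groups.append((s[i], j - i))
--         i = j
--     max_freq = max(c for _, c in groups)
--     res = [v for v, c in groups if c == max_freq]
--     return res[0] if len(res) <= 1 else res[1]
-- ===== Notes on version B (the rewrite author's own statement) =====
-- stated objective: alternative
-- what changed: Replaces A's dict-of-counts built in two passes plus a filter over the dict with a sort-then-run-length-encode pass: the sorted copy is grouped into (value, count) runs, the max run length is taken, and the qualifying values are already in ascending order so no final sort is needed.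
import Mathlib
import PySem

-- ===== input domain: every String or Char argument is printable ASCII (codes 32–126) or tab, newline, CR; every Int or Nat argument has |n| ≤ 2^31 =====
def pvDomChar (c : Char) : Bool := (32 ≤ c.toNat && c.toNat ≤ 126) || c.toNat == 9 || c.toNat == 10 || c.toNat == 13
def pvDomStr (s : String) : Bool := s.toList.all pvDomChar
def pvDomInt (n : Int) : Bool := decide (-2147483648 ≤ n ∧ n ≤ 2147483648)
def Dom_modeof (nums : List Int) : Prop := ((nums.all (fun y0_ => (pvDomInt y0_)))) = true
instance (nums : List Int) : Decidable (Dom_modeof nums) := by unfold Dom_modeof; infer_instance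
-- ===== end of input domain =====

-- B replaces A's hash-count dict and final sort by sort-then-run-length-encode (alternative decomposition, not claimed faster).

-- ===== PORT A =====
def modeof (nums : List Int) : Int :=
  -- dict_nums = {}; for num in set(nums): dict_nums[num] = 0
  let d0 : PySem.Dict Int Int :=
    (PySem.Set.ofList nums).foldl (fun d num => d.insert num 0) PySem.Dict.empty
  -- for num in nums: dict_nums[num] += 1
  let d : PySem.Dict Int Int :=
    nums.foldl (fun d num => d.modify num 0 (· + 1)) d0
  -- max_freq = max(dict_nums.values())   (raises ValueError on empty: excluded by Pre_)
  let maxFreq : Int := (PySem.List.max? d.values (fun x => x)).getD 0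
  -- res = []; for num in dict_nums: if dict_nums[num] == max_freq: res.append(num)
  let res : List Int :=
    d.keys.foldl (fun r num => if d.getD num 0 = maxFreq then r ++ [num] else r) []
  -- res.sort()
  let res2 := PySem.List.sorted res (fun x => x) false
  -- return res[0] if len(res) <= 1 else res[1]   (res nonempty whenever nums is)
  if res2.length ≤ 1 then (PySem.List.pyGet? res2 0).getD 0
  else (PySem.List.pyGet? res2 1).getD 0

-- ===== PORT B =====
-- the inner while loop of Source B: one run of equal values (takeWhile) is grouped, the scan resumes after it (dropWhile)
def rleRuns : List Int → List (Int × Int)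
  | [] => []
  | x :: t =>
      (x, 1 + ((t.takeWhile (fun y => y == x)).length : Int)) ::
        rleRuns (t.dropWhile (fun y => y == x))
termination_by l => l.length
decreasing_by
  simp only [List.length_cons]
  exact Nat.lt_succ_of_le (List.length_dropWhile_le _ _)

def modeof_alt (nums : List Int) : Int :=
  -- s = sorted(nums)
  let s := PySem.List.sorted nums (fun x => x) false
  -- groups = run-length encoding of s (the two while loops)
  let groups := rleRuns s
  -- max_freq = max(c for _, c in groups)   (raises ValueError on empty: excluded by Pre_)
  let maxFreq : Int := (PySem.List.max? (groups.map (fun p => p.2)) (fun x => x)).getD 0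
  -- res = [v for v, c in groups if c == max_freq]
  let res := groups.foldl (fun r p => if p.2 = maxFreq then r ++ [p.1] else r) []
  -- return res[0] if len(res) <= 1 else res[1]
  if res.length ≤ 1 then (PySem.List.pyGet? res 0).getD 0
  else (PySem.List.pyGet? res 1).getD 0

-- ===== PRECONDITION & SPEC =====
-- Pre_ excludes only the empty list, on which the Python A raises ValueError (max() of an empty sequence).
def Pre_modeof (nums : List Int) : Prop := nums ≠ []
instance (nums : List Int) : Decidable (Pre_modeof nums) := by unfold Pre_modeof; infer_instance
def pvWitness_modeof : List Int := [1, 2, 2]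

def Spec_modeof (nums : List Int) (out : Int) : Prop := out = modeof_alt nums
instance (nums : List Int) (out : Int) : Decidable (Spec_modeof nums out) := by unfold Spec_modeof; infer_instance

-- ===== CLAIM (what is proved, stated in full; the proofs are below) =====
def Claim_equal_modeof : Prop := ∀ (nums : List Int), Dom_modeof nums → Pre_modeof nums → Spec_modeof nums (modeof nums)

-- ===== LEMMAS AND PROOFS =====

-- the run-length encoding of a sorted list: counts are the element counts, the values are exactly
-- the list's values, and they are strictly increasing
theorem rleRuns_spec : ∀ (l : List Int), l.Pairwise (· ≤ ·) →
    (∀ p ∈ rleRuns l, p.2 = (l.count p.1 : Int)) ∧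
    (∀ v, v ∈ (rleRuns l).map Prod.fst ↔ v ∈ l) ∧
    ((rleRuns l).map Prod.fst).Pairwise (· < ·)
  | [], _ => by simp [rleRuns]
  | x :: t, hs => by
    have hx_le : ∀ y ∈ t, x ≤ y := (List.pairwise_cons.mp hs).1
    have ht : t.Pairwise (· ≤ ·) := (List.pairwise_cons.mp hs).2
    have hw_sorted : (t.dropWhile (fun y => y == x)).Pairwise (· ≤ ·) :=
      List.Pairwise.sublist (List.dropWhile_sublist _) ht
    have hu_eq : ∀ y ∈ t.takeWhile (fun y => y == x), y = x := by
      intro y hy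
      simpa using List.mem_takeWhile_imp hy
    have hw_gt : ∀ y ∈ t.dropWhile (fun y => y == x), x < y := by
      cases hw : t.dropWhile (fun y => y == x) with
      | nil => intro y hy; simp at hy
      | cons h0 w' =>
        have hne : t.dropWhile (fun y => y == x) ≠ [] := by simp [hw]
        have hh0 : ((t.dropWhile (fun y => y == x)).head hne == x) = false :=
          List.head_dropWhile_not (fun y => y == x) hne
        have hhd : (t.dropWhile (fun y => y == x)).head hne = h0 := by simp [hw]
        rw [hhd] at hh0
        have hh0ne : h0 ≠ x := by simpa using hh0
        have hh0t : h0 ∈ t :=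
          List.Sublist.mem (hw ▸ List.mem_cons_self) (List.dropWhile_sublist _)
        have hxh0 : x < h0 := lt_of_le_of_ne (hx_le h0 hh0t) (Ne.symm hh0ne)
        have hle : ∀ y ∈ w', h0 ≤ y := by
          have := hw ▸ hw_sorted
          exact (List.pairwise_cons.mp this).1
        intro y hy
        rcases List.mem_cons.mp hy with rfl | hy'
        · exact hxh0
        · exact lt_of_lt_of_le hxh0 (hle y hy')
    have IH := rleRuns_spec (t.dropWhile (fun y => y == x)) hw_sorted
    have htw : t.takeWhile (fun y => y == x) ++ t.dropWhile (fun y => y == x) = t :=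
      List.takeWhile_append_dropWhile
    have hcu : (t.takeWhile (fun y => y == x)).count x = (t.takeWhile (fun y => y == x)).length :=
      List.count_eq_length.mpr (fun b hb => (hu_eq b hb).symm)
    have hcw : (t.dropWhile (fun y => y == x)).count x = 0 :=
      List.count_eq_zero.mpr (fun hxx => lt_irrefl x (hw_gt x hxx))
    have hct : List.count x t = (t.takeWhile (fun y => y == x)).length := by
      conv_lhs => rw [← htw]
      rw [List.count_append, hcu, hcw]
      omega
    have hcx : ((x :: t).count x : Int) = 1 + ((t.takeWhile (fun y => y == x)).length : Int) := by
      rw [List.count_cons_self, hct]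
      push_cast; ring
    have hcv : ∀ v ∈ t.dropWhile (fun y => y == x),
        (x :: t).count v = (t.dropWhile (fun y => y == x)).count v := by
      intro v hv
      have hvx : x ≠ v := ne_of_lt (hw_gt v hv)
      have hcu0 : (t.takeWhile (fun y => y == x)).count v = 0 :=
        List.count_eq_zero.mpr (fun hvv => hvx.symm (hu_eq v hvv))
      have hct2 : List.count v t = List.count v (t.dropWhile (fun y => y == x)) := by
        conv_lhs => rw [← htw]
        rw [List.count_append, hcu0, Nat.zero_add]
      rw [List.count_cons, hct2]
      simp [hvx]
    have hr : rleRuns (x :: t) =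
        (x, 1 + ((t.takeWhile (fun y => y == x)).length : Int)) ::
          rleRuns (t.dropWhile (fun y => y == x)) := by
      rw [rleRuns]
    refine ⟨?_, ?_, ?_⟩
    · intro p hp
      rw [hr] at hp
      rcases List.mem_cons.mp hp with rfl | hp'
      · simpa using hcx.symm
      · rw [IH.1 p hp', hcv p.1 ((IH.2.1 p.1).mp (List.mem_map_of_mem hp'))]
    · intro v
      rw [hr]
      simp only [List.map_cons, List.mem_cons]
      rw [IH.2.1 v]
      constructor
      · rintro (rfl | hv)
        · exact Or.inl rfl
        · exact Or.inr (List.Sublist.mem hv (List.dropWhile_sublist _))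
      · rintro (rfl | hv)
        · exact Or.inl rfl
        · rw [← htw] at hv
          rcases List.mem_append.mp hv with hv' | hv'
          · exact Or.inl (hu_eq v hv')
          · exact Or.inr hv'
    · rw [hr]
      simp only [List.map_cons]
      refine List.pairwise_cons.mpr ⟨?_, IH.2.2⟩
      intro y hy
      exact hw_gt y ((IH.2.1 y).mp hy)
termination_by l => l.length
decreasing_by
  simp only [List.length_cons]
  exact Nat.lt_succ_of_le (List.length_dropWhile_le _ _)

-- the value of a Python max() is invariant under permutation of the list
theorem max_getD_eq_of_perm (xs ys : List Int) (h : xs.Perm ys) :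
    (PySem.List.max? xs (fun x => x)).getD 0 = (PySem.List.max? ys (fun x => x)).getD 0 := by
  cases hx : PySem.List.max? xs (fun x => x) with
  | none =>
      have hxs : xs = [] := (PySem.List.max?_eq_none_iff xs _).mp hx
      have hys : ys = [] := (hxs ▸ h).symm.eq_nil
      rw [hys, (PySem.List.max?_eq_none_iff ([] : List Int) _).mpr rfl]
  | some m =>
      have hm : m ∈ xs := PySem.List.max?_mem hx
      cases hy : PySem.List.max? ys (fun x => x) with
      | none =>
          have hys : ys = [] := (PySem.List.max?_eq_none_iff ys _).mp hy
          exact absurd (h.subset hm) (by simp [hys])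
      | some m' =>
          have hm' : m' ∈ ys := PySem.List.max?_mem hy
          have h1 : m ≤ m' := PySem.List.max?_isMax hy m (h.subset hm)
          have h2 : m' ≤ m := PySem.List.max?_isMax hx m' (h.symm.subset hm')
          simp [le_antisymm h1 h2]

-- the zero-initialisation pass: every lookup in d0 yields 0
theorem getD_foldl_insert_zero : ∀ (l : List Int) (d : PySem.Dict Int Int),
    (∀ k, d.getD k 0 = 0) → ∀ k, (l.foldl (fun d num => d.insert num 0) d).getD k 0 = 0 := by
  intro l
  induction l with
  | nil => intro d h k; exact h k
  | cons x t ih =>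
      intro d h k
      simp only [List.foldl_cons]
      refine ih _ (fun k' => ?_) k
      rw [PySem.Dict.getD_insert]
      split_ifs with hk
      · rfl
      · exact h k'

theorem modeof_eq_alt (nums : List Int) : modeof nums = modeof_alt nums := by
  simp only [modeof, modeof_alt]
  set d : PySem.Dict Int Int :=
    nums.foldl (fun d num => d.modify num 0 (· + 1))
      ((PySem.Set.ofList nums).foldl (fun d num => d.insert num 0) PySem.Dict.empty) with hd_def
  set s := PySem.List.sorted nums (fun x => x) false with hs_def
  set C : Int → Int := fun v => (nums.count v : Int) with hC
  have hd0 : ∀ k, ((PySem.Set.ofList nums).foldl (fun d num => d.insert num 0)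
      (PySem.Dict.empty : PySem.Dict Int Int)).getD k 0 = 0 :=
    getD_foldl_insert_zero _ _ (fun k => PySem.Dict.getD_empty k 0)
  have hG1 : ∀ v, d.getD v 0 = C v := by
    intro v
    rw [hd_def, PySem.Dict.getD_foldl_modify_add_one, hd0]
    simp [hC]
  have hkeys : d.keys = PySem.Set.update (PySem.Set.update [] (PySem.Set.ofList nums)) nums := by
    rw [hd_def, PySem.Dict.keys_foldl_modify, PySem.Dict.keys_foldl_insert]
    rfl
  have hkeysN : d.keys.Nodup := by
    rw [hkeys]
    exact PySem.Set.nodup_update _ _ (PySem.Set.nodup_update _ _ List.nodup_nil)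
  have hkeysM : ∀ v, v ∈ d.keys ↔ v ∈ nums := by
    intro v
    rw [hkeys]
    simp only [PySem.Set.mem_update, PySem.Set.mem_ofList, List.not_mem_nil, false_or]
    tauto
  have hs_sorted : s.Pairwise (· ≤ ·) := PySem.List.sorted_pairwise nums (fun x => x)
  have RS := rleRuns_spec s hs_sorted
  have hcnt : ∀ v, s.count v = nums.count v :=
    fun v => (PySem.List.sorted_perm nums (fun x => x) false).count_eq v
  have hfst_nodup : ((rleRuns s).map Prod.fst).Nodup := RS.2.2.imp (fun h => ne_of_lt h)
  have hperm : ((rleRuns s).map Prod.fst).Perm d.keys :=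
    (List.perm_ext_iff_of_nodup hfst_nodup hkeysN).mpr
      (fun a => by rw [RS.2.1 a, hkeysM a, hs_def, PySem.List.mem_sorted])
  have hvals : d.values = d.keys.map C := by
    rw [PySem.Dict.values_eq_map_keys d hkeysN 0]
    exact List.map_congr_left (fun k _ => hG1 k)
  have hsnd : (rleRuns s).map (fun p => p.2) = ((rleRuns s).map Prod.fst).map C := by
    rw [List.map_map]
    exact List.map_congr_left (fun p hp => by rw [RS.1 p hp]; simp [hC, hcnt])
  have hmax : (PySem.List.max? d.values (fun x => x)).getD 0
      = (PySem.List.max? ((rleRuns s).map (fun p => p.2)) (fun x => x)).getD 0 := by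
    rw [hvals, hsnd]
    exact max_getD_eq_of_perm _ _ (hperm.map C).symm
  simp only [hmax]
  generalize (PySem.List.max? ((rleRuns s).map (fun p => p.2)) (fun x => x)).getD 0 = M
  have hresA : d.keys.foldl (fun r num => if d.getD num 0 = M then r ++ [num] else r) []
      = d.keys.filter (fun n => decide (C n = M)) := by
    rw [show (fun (r : List Int) num => if d.getD num 0 = M then r ++ [num] else r)
        = (fun acc x => if (fun n => decide (C n = M)) x = true then acc ++ [id x] else acc) from by
      funext r num; rw [hG1 num]; simp]
    rw [PySem.List.foldl_append_if]
    simp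
  have hresB : (rleRuns s).foldl (fun r p => if p.2 = M then r ++ [p.1] else r) []
      = ((rleRuns s).map Prod.fst).filter (fun n => decide (C n = M)) := by
    rw [show (fun (r : List Int) (p : Int × Int) => if p.2 = M then r ++ [p.1] else r)
        = (fun acc p => if (fun q : Int × Int => decide (q.2 = M)) p = true
            then acc ++ [Prod.fst p] else acc) from by
      funext r p; simp]
    rw [PySem.List.foldl_append_if, List.nil_append]
    rw [List.filter_congr (q := fun q : Int × Int => decide (C q.1 = M))
      (fun p hp => by rw [RS.1 p hp]; simp [hC, hcnt])]
    rw [show (fun q : Int × Int => decide (C q.1 = M))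
        = ((fun n => decide (C n = M)) ∘ Prod.fst) from rfl]
    exact (List.filter_map).symm
  rw [hresA, hresB]
  rw [PySem.List.sorted_eq_of_perm_of_pairwise_lt _ _ _ (hperm.filter _) (RS.2.2.filter _)]

-- ===== VERDICT (by name: the statement is the Claim_ definition above) =====
theorem modeof_spec : Claim_equal_modeof := by
  intro nums _ _
  exact modeof_eq_alt nums
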